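-- pv_equiv track=rewrite | github.com/thelastpickle/cassandra-medusa | medusa/restore_cluster.py | _chunk_hosts
-- ===== SOURCE A (Python) =====
-- def _chunk_hosts(backup_hosts, restore_hosts):
--     def _chunk(my_list, nb_chunks):
--         groups = []
--         for i in range(nb_chunks):
--             groups.append([])
--         for i in range(len(my_list)):
--             groups[i % nb_chunks].append(my_list[i])
--         return groups
--
--     if len(backup_hosts) >= len(restore_hosts):
--         return _chunk(list(backup_hosts), len(restore_hosts))
--     return _chunk(list(backup_hosts), len(backup_hosts))
-- ===== SOURCE B (Python) =====
-- def _chunk_hosts(backup_hosts, restore_hosts):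
--     # Per-bucket construction: bucket j is the stride-nb_chunks selection starting at j.
--     lst = list(backup_hosts)
--     nb_chunks = min(len(lst), len(restore_hosts))
--
--     def every_nth(start):
--         out = []
--         i = start
--         n = len(lst)
--         while i < n:
--             out.append(lst[i])
--             i += nb_chunks
--         return out
--
--     return [every_nth(j) for j in range(nb_chunks)]
-- ===== Notes on version B (the rewrite author's own statement) =====
-- stated objective: alternative
-- what changed: B builds each of the nb_chunks buckets directly as a strided selection (per-bucket slicing) instead of A's per-element scatter into bucket i % nb_chunks; same O(n) cost.
import Mathlib
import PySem

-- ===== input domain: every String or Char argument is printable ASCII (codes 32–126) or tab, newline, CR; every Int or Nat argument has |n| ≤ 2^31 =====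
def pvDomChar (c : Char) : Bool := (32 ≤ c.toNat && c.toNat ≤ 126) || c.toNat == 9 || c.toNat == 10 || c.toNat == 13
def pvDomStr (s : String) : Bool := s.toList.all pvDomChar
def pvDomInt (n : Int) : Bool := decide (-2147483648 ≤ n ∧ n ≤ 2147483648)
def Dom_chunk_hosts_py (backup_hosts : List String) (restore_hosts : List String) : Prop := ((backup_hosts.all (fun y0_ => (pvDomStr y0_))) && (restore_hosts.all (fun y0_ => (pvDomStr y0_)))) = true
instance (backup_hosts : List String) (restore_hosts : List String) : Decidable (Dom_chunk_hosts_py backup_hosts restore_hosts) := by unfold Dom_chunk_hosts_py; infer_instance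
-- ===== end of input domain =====

-- B builds each bucket directly as a strided selection instead of A's per-element
-- scatter into bucket i % nb_chunks (alternative decomposition, same cost).

-- ===== PORT A =====
-- _chunk(my_list, nb_chunks): build nb_chunks empty groups, then scatter element i
-- into groups[i % nb_chunks].  Loop indices are the nonnegative ints of range(), so
-- Nat `%` and Nat indexing coincide with Python here; Python raises ZeroDivisionError
-- when nb_chunks = 0 and my_list ≠ [] — excluded by Pre_ below.
def pyChunk (myList : List String) (nbChunks : Nat) : List (List String) :=
  let groups : List (List String) :=
    (List.range nbChunks).foldl (fun g _ => g ++ [[]]) []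
  (List.range myList.length).foldl
    (fun g i => g.modify (i % nbChunks) (fun grp => grp ++ [myList.getD i ""])) groups

def chunk_hosts_py (backup_hosts : List String) (restore_hosts : List String) : List (List String) :=
  if backup_hosts.length ≥ restore_hosts.length then
    pyChunk backup_hosts restore_hosts.length
  else
    pyChunk backup_hosts backup_hosts.length

-- ===== PORT B =====
-- every_nth(start): index loop i = start, start+nb, start+nb+2*nb, … while i < len(lst).
-- Every call site has nb ≥ 1; the step is written (nb - 1) + 1 (equal to nb there) so
-- the recursion is total for every nb.
def pvEveryNth (lst : List String) (nb : Nat) (i : Nat) : List String :=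
  if h : i < lst.length then lst[i] :: pvEveryNth lst nb (i + (nb - 1) + 1) else []
termination_by lst.length - i

def chunk_hosts_py_alt (backup_hosts : List String) (restore_hosts : List String) : List (List String) :=
  let lst := backup_hosts
  let nbChunks := min lst.length restore_hosts.length
  (List.range nbChunks).map (fun j => pvEveryNth lst nbChunks j)

-- ===== PRECONDITION & SPEC =====
-- Pre_ excludes exactly the inputs where A raises ZeroDivisionError:
-- backup_hosts non-empty with restore_hosts empty (nb_chunks = 0, `i % 0`).
def Pre_chunk_hosts_py (backup_hosts : List String) (restore_hosts : List String) : Prop :=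
  backup_hosts = [] ∨ restore_hosts ≠ []
instance (backup_hosts : List String) (restore_hosts : List String) : Decidable (Pre_chunk_hosts_py backup_hosts restore_hosts) := by unfold Pre_chunk_hosts_py; infer_instance

def pvWitness_chunk_hosts_py : List String × List String := (["a", "b", "c"], ["x", "y"])

def Spec_chunk_hosts_py (backup_hosts : List String) (restore_hosts : List String) (out : List (List String)) : Prop := out = chunk_hosts_py_alt backup_hosts restore_hosts
instance (backup_hosts : List String) (restore_hosts : List String) (out : List (List String)) : Decidable (Spec_chunk_hosts_py backup_hosts restore_hosts out) := by unfold Spec_chunk_hosts_py; infer_instance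

-- ===== CLAIM (what is proved, stated in full; the proofs are below) =====
def Claim_equal_chunk_hosts_py : Prop := ∀ (backup_hosts : List String) (restore_hosts : List String), Dom_chunk_hosts_py backup_hosts restore_hosts → Pre_chunk_hosts_py backup_hosts restore_hosts → Spec_chunk_hosts_py backup_hosts restore_hosts (chunk_hosts_py backup_hosts restore_hosts)

-- ===== LEMMAS AND PROOFS =====

-- proof-side strided selection, structural on the list suffix
def pvSel (n : Nat) : List String → List String
  | [] => []
  | x :: xs => x :: pvSel n (xs.drop (n - 1))
termination_by l => l.length
decreasing_by simp [List.length_drop]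

theorem pvSel_nil (n : Nat) : pvSel n [] = [] := by
  rw [pvSel]

theorem pvSel_cons (n : Nat) (x : String) (xs : List String) :
    pvSel n (x :: xs) = x :: pvSel n (xs.drop (n - 1)) := by
  rw [pvSel]

-- B's index loop computes the strided selection of the suffix.
theorem pvEveryNth_eq_pvSel (l : List String) (nb : Nat) (hnb : 0 < nb) :
    ∀ (N i : Nat), l.length - i ≤ N → pvEveryNth l nb i = pvSel nb (l.drop i) := by
  intro N
  induction N with
  | zero =>
    intro i hi
    have h : ¬ i < l.length := by omega
    rw [pvEveryNth, dif_neg h, List.drop_eq_nil_of_le (by omega), pvSel_nil]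
  | succ N ih =>
    intro i hi
    by_cases h : i < l.length
    · rw [pvEveryNth, dif_pos h, List.drop_eq_getElem_cons h, pvSel_cons,
        List.drop_drop, ih (i + (nb - 1) + 1) (by omega)]
      have : i + 1 + (nb - 1) = i + (nb - 1) + 1 := by omega
      rw [this]
    · rw [pvEveryNth, dif_neg h, List.drop_eq_nil_of_le (by omega), pvSel_nil]

-- A's first loop builds nb empty groups.
theorem pyChunk_init (n : Nat) :
    (List.range n).foldl (fun g _ => g ++ ([[]] : List (List String))) [] = List.replicate n [] := by
  induction n with
  | zero => rfl
  | succ n ih => simp [List.range_succ, List.foldl_append, ih, List.replicate_succ']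

-- m % n = j ↔ n divides m - j, for j < n and j ≤ m.
theorem pv_mod_eq_iff {n j m : Nat} (hj : j < n) (hle : j ≤ m) :
    m % n = j ↔ (m - j) % n = 0 := by
  constructor
  · intro h
    have hm : m = n * (m / n) + j := by rw [← h, Nat.div_add_mod]
    have : m - j = n * (m / n) := by omega
    simp [this]
  · intro h
    obtain ⟨k, hk⟩ := (Nat.dvd_iff_mod_eq_zero).2 h
    have hm : m = n * k + j := by omega
    rw [hm, Nat.mul_add_mod, Nat.mod_eq_of_lt hj]

-- Appending one element to the scanned list appends it to the strided selection
-- iff the list length is a multiple of the stride.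
theorem pvSel_append (n : Nat) (hn : 0 < n) (x : String) :
    ∀ (N : Nat) (l : List String), l.length ≤ N →
      pvSel n (l ++ [x]) = pvSel n l ++ (if l.length % n = 0 then [x] else []) := by
  intro N
  induction N with
  | zero =>
    intro l hl
    have : l = [] := List.eq_nil_of_length_eq_zero (by omega)
    subst this
    simp [pvSel_nil, pvSel_cons, Nat.mod_eq_of_lt hn]
  | succ N ih =>
    intro l hl
    cases l with
    | nil => simp [pvSel_nil, pvSel_cons, Nat.mod_eq_of_lt hn]
    | cons y ys =>
      by_cases hcase : n - 1 ≤ ys.length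
      · have hdrop : (ys ++ [x]).drop (n - 1) = ys.drop (n - 1) ++ [x] :=
          List.drop_append_of_le_length hcase
        have hlen : (ys.drop (n - 1)).length ≤ N := by
          simp only [List.length_drop]
          simp at hl; omega
        have hrec := ih (ys.drop (n - 1)) hlen
        have hmod : (ys.drop (n - 1)).length % n = 0 ↔ (y :: ys).length % n = 0 := by
          simp only [List.length_drop, List.length_cons]
          have : ys.length + 1 = (ys.length - (n - 1)) + n := by omega
          rw [this, Nat.add_mod_right]
        rw [List.cons_append, pvSel_cons, hdrop, hrec, pvSel_cons]
        by_cases h0 : (y :: ys).length % n = 0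
        · rw [if_pos (hmod.2 h0), if_pos (by simpa using h0)]
          simp
        · rw [if_neg (fun h => h0 (hmod.1 h)), if_neg (by simpa using h0)]
          simp
      · -- n - 1 > ys.length : the drop empties both lists, and length (y::ys) < n so % ≠ 0
        have h1 : (ys ++ [x]).length ≤ n - 1 := by simp; omega
        have h2 : ys.length ≤ n - 1 := by omega
        have hne : (y :: ys).length % n ≠ 0 := by
          rw [Nat.mod_eq_of_lt (by simp; omega)]
          simp
        rw [List.cons_append, pvSel_cons, pvSel_cons,
          List.drop_eq_nil_of_le h1, List.drop_eq_nil_of_le h2,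
          if_neg (by simpa using hne)]
        simp

-- modify on a map over range, pointwise.
theorem pv_map_range_modify (n k : Nat) (f : Nat → List String) (x : String) :
    ((List.range n).map f).modify k (fun g => g ++ [x])
      = (List.range n).map (fun j => f j ++ if j = k then [x] else []) := by
  apply List.ext_getElem
  · simp [List.length_modify]
  · intro i h1 h2
    simp only [List.getElem_modify, List.getElem_map, List.getElem_range] at *
    by_cases h : k = i
    · simp [h]
    · rw [if_neg h, if_neg (fun hik : i = k => h hik.symm)]
      simp

-- Per-bucket effect of appending one element to the chunked list.
theorem pv_bucket_append (n : Nat) (hn : 0 < n) (l : List String) (x : String)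
    (j : Nat) (hj : j < n) :
    pvSel n ((l ++ [x]).drop j)
      = pvSel n (l.drop j) ++ (if j = l.length % n then [x] else []) := by
  by_cases hle : j ≤ l.length
  · rw [List.drop_append_of_le_length hle,
        pvSel_append n hn x (l.drop j).length _ le_rfl]
    have hlen : (l.drop j).length = l.length - j := by simp
    rw [hlen]
    have hiff : l.length % n = j ↔ (l.length - j) % n = 0 := pv_mod_eq_iff hj hle
    have hcond : ((l.length - j) % n = 0) ↔ (j = l.length % n) := by
      rw [← hiff]; exact eq_comm
    congr 1
    by_cases h0 : (l.length - j) % n = 0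
    · rw [if_pos h0, if_pos (hcond.1 h0)]
    · rw [if_neg h0, if_neg (fun h => h0 (hcond.2 h))]
  · have h1 : (l ++ [x]).length ≤ j := by simp; omega
    have h2 : l.length ≤ j := by omega
    have hne : ¬ j = l.length % n := by
      rw [Nat.mod_eq_of_lt (by omega)]; omega
    rw [List.drop_eq_nil_of_le h1, List.drop_eq_nil_of_le h2, if_neg hne]
    simp [pvSel_nil]

-- A's scatter equals the strided selections of the suffixes.
theorem pyChunk_eq_sel (n : Nat) (hn : 0 < n) (l : List String) :
    pyChunk l n = (List.range n).map (fun j => pvSel n (l.drop j)) := by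
  induction l using List.reverseRecOn with
  | nil =>
    unfold pyChunk
    simp only [List.length_nil, List.range_zero, List.foldl_nil]
    rw [pyChunk_init]
    simp [pvSel_nil, List.map_const']
  | append_singleton l x ih =>
    unfold pyChunk
    simp only [List.length_append, List.length_cons, List.length_nil, List.range_succ,
      List.foldl_append, List.foldl_cons, List.foldl_nil]
    have hcongr :
        (List.range l.length).foldl
            (fun g i => g.modify (i % n) (fun grp => grp ++ [(l ++ [x]).getD i ""]))
            ((List.range n).foldl (fun g _ => g ++ [[]]) [])
          = pyChunk l n := by
      unfold pyChunk
      apply PySem.List.foldl_congr_mem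
      intro acc i hi
      rw [List.getD_append _ _ _ _ (List.mem_range.1 hi)]
    rw [hcongr, ih]
    have hx : (l ++ [x]).getD l.length "" = x := by
      simp [List.getD_eq_getElem?_getD]
    rw [hx, pv_map_range_modify n (l.length % n)]
    apply List.map_congr_left
    intro j hj
    rw [pv_bucket_append n hn l x j (List.mem_range.1 hj)]

-- Main lemma: for a positive chunk count, A's scatter equals B's strided buckets.
theorem pyChunk_eq (n : Nat) (hn : 0 < n) (l : List String) :
    pyChunk l n = (List.range n).map (fun j => pvEveryNth l n j) := by
  rw [pyChunk_eq_sel n hn l]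
  apply List.map_congr_left
  intro j _
  rw [pvEveryNth_eq_pvSel l n hn l.length j (by omega)]

-- ===== VERDICT (by name: the statement is the Claim_ definition above) =====
theorem chunk_hosts_py_spec : Claim_equal_chunk_hosts_py := by
  intro b r _ hpre
  unfold Spec_chunk_hosts_py chunk_hosts_py chunk_hosts_py_alt
  cases b with
  | nil =>
    rcases Nat.eq_zero_or_pos r.length with h0 | h0
    · simp [h0, pyChunk]
    · simp [pyChunk]
  | cons y ys =>
    have hr : r ≠ [] := by
      rcases hpre with h | h
      · exact absurd h (by simp)
      · exact h
    have hrpos : 0 < r.length := List.length_pos_iff.2 hr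
    by_cases h : (y :: ys).length ≥ r.length
    · have hmin : min (y :: ys).length r.length = r.length := Nat.min_eq_right h
      simp only [ge_iff_le, h, if_true, hmin]
      exact pyChunk_eq r.length hrpos (y :: ys)
    · have hmin : min (y :: ys).length r.length = (y :: ys).length := by omega
      simp only [ge_iff_le, h, if_false, hmin]
      exact pyChunk_eq (y :: ys).length (by simp) (y :: ys)
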